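-- pv_equiv track=rewrite | github.com/herbeeg/hg-project-euler | 1-10/problem_5.py | validFactors
-- ===== SOURCE A (Python) =====
-- def validFactors(number):
--     if 0 != number % 20:
--         """We can assume that the multiple must evenly divisible by the largest value."""
--         return False
--
--     for n in range(2, 20):
--         """We can ignore 1 and 20 from the factors check as these have already been validated."""
--         if 0 != number % n:
--             return False
--
--     return True
-- ===== SOURCE B (Python) =====
-- def validFactors(number):
--     # 232792560 = lcm(1..20): one modulo replaces the per-factor loop
--     return number % 232792560 == 0
-- ===== Notes on version B (the rewrite author's own statement) =====
-- stated objective: simpler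
-- what changed: Replaced the %20 guard plus the loop over 2..19 with a single closed-form modulo test against the precomputed constant 232792560 = lcm(1..20).
import Mathlib
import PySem

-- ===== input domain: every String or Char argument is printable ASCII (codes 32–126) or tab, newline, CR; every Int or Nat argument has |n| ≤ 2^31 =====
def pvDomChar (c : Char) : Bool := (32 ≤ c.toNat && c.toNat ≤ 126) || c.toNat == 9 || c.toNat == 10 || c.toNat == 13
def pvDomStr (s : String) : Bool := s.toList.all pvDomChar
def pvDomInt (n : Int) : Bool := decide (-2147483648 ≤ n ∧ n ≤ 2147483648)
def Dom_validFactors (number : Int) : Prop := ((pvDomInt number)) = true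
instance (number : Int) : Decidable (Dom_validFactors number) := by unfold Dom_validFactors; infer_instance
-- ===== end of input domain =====

-- B replaces A's %20 guard and loop over 2..19 with one modulo by 232792560 = lcm(1..20); objective: simpler.

-- ===== PORT A =====
-- the 'for n in range(2, 20)' loop with its early 'return False'
def vfLoop (number : Int) : List Int → Bool
  | [] => true
  | n :: rest => if 0 ≠ PySem.Int.mod number n then false else vfLoop number rest

def validFactors (number : Int) : Bool :=
  if 0 ≠ PySem.Int.mod number 20 then false
  else vfLoop number (PySem.List.pyRange 2 20 1)

-- ===== PORT B =====
def validFactors_alt (number : Int) : Bool :=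
  PySem.Int.mod number 232792560 == 0

-- ===== PRECONDITION & SPEC =====
def Spec_validFactors (number : Int) (out : Bool) : Prop := out = validFactors_alt number
instance (number : Int) (out : Bool) : Decidable (Spec_validFactors number out) := by unfold Spec_validFactors; infer_instance

-- ===== CLAIM (what is proved, stated in full; the proofs are below) =====
def Claim_equal_validFactors : Prop := ∀ (number : Int), Dom_validFactors number → Spec_validFactors number (validFactors number)

-- ===== LEMMAS AND PROOFS =====

theorem vfLoop_eq_true_iff (number : Int) (l : List Int) :
    vfLoop number l = true ↔ ∀ k ∈ l, PySem.Int.mod number k = 0 := by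
  induction l with
  | nil => simp [vfLoop]
  | cons a rest ih =>
    simp only [vfLoop]
    split_ifs with h
    · simp only [false_iff]
      intro hall
      exact h (hall a (List.mem_cons_self)).symm
    · rw [not_ne_iff] at h
      simp [ih, h.symm]

theorem pyRange_2_20 : PySem.List.pyRange 2 20 1 =
    [2,3,4,5,6,7,8,9,10,11,12,13,14,15,16,17,18,19] := by decide

theorem coprime_mul_dvd {a b n : Int} (h : Int.gcd a b = 1) (ha : a ∣ n) (hb : b ∣ n) :
    a * b ∣ n := by
  exact (Int.isCoprime_iff_gcd_eq_one.mpr h).mul_dvd ha hb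

theorem lcm_dvd_of_parts {n : Int}
    (h16 : (16:Int) ∣ n) (h9 : (9:Int) ∣ n) (h5 : (5:Int) ∣ n) (h7 : (7:Int) ∣ n)
    (h11 : (11:Int) ∣ n) (h13 : (13:Int) ∣ n) (h17 : (17:Int) ∣ n) (h19 : (19:Int) ∣ n) :
    (232792560:Int) ∣ n := by
  have d1 : (144:Int) ∣ n := by
    have := coprime_mul_dvd (a := 16) (b := 9) (by decide) h16 h9; norm_num at this; exact this
  have d2 : (720:Int) ∣ n := by
    have := coprime_mul_dvd (a := 144) (b := 5) (by decide) d1 h5; norm_num at this; exact this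
  have d3 : (5040:Int) ∣ n := by
    have := coprime_mul_dvd (a := 720) (b := 7) (by decide) d2 h7; norm_num at this; exact this
  have d4 : (55440:Int) ∣ n := by
    have := coprime_mul_dvd (a := 5040) (b := 11) (by decide) d3 h11; norm_num at this; exact this
  have d5 : (720720:Int) ∣ n := by
    have := coprime_mul_dvd (a := 55440) (b := 13) (by decide) d4 h13; norm_num at this; exact this
  have d6 : (12252240:Int) ∣ n := by
    have := coprime_mul_dvd (a := 720720) (b := 17) (by decide) d5 h17; norm_num at this; exact this
  have := coprime_mul_dvd (a := 12252240) (b := 19) (by decide) d6 h19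
  norm_num at this; exact this

theorem validFactors_eq_true_iff (n : Int) :
    validFactors n = true ↔ (232792560:Int) ∣ n := by
  unfold validFactors
  rw [pyRange_2_20]
  split_ifs with h
  · simp only [false_iff]
    intro hdvd
    exact h (by
      have : (20:Int) ∣ n := dvd_trans (by norm_num) hdvd
      exact ((PySem.Int.mod_eq_zero_iff_dvd n 20).mpr this).symm)
  · rw [not_ne_iff] at h
    rw [vfLoop_eq_true_iff]
    constructor
    · intro hall
      have g : ∀ k : Int, k ∈ ([2,3,4,5,6,7,8,9,10,11,12,13,14,15,16,17,18,19] : List Int) →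
          k ∣ n := fun k hk => (PySem.Int.mod_eq_zero_iff_dvd n k).mp (hall k hk)
      exact lcm_dvd_of_parts (g 16 (by decide)) (g 9 (by decide)) (g 5 (by decide))
        (g 7 (by decide)) (g 11 (by decide)) (g 13 (by decide)) (g 17 (by decide))
        (g 19 (by decide))
    · intro hdvd k hk
      refine (PySem.Int.mod_eq_zero_iff_dvd n k).mpr (dvd_trans ?_ hdvd)
      fin_cases hk <;> norm_num

-- ===== VERDICT (by name: the statement is the Claim_ definition above) =====
theorem validFactors_spec : Claim_equal_validFactors := by
  intro number _
  unfold Spec_validFactors validFactors_alt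
  by_cases h : (232792560:Int) ∣ number
  · rw [(validFactors_eq_true_iff number).mpr h,
      (PySem.Int.mod_eq_zero_iff_dvd number 232792560).mpr h]
    decide
  · have hf : validFactors number = false := by
      rcases Bool.eq_false_or_eq_true (validFactors number) with hb | hb
      · exact absurd ((validFactors_eq_true_iff number).mp hb) h
      · exact hb
    simp only [hf, Bool.false_eq, beq_eq_false_iff_ne, ne_eq,
      PySem.Int.mod_eq_zero_iff_dvd]
    exact h
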